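-- pv_equiv track=rewrite | github.com/shmulvad/Caching-Strategies-for-Image-Processing | src/data_structures/morton_order.py | __get_hex_const__
-- ===== SOURCE A (Python) =====
-- def __get_hex_const__(successive_digits: int, spacing: int,
--                       num_bits: int = 32) -> int:
--     """
--     Returns the hexadecimal constant to be used for bit parting for a given
--     number of succesive digits and spacing inbetween
--
--     >>> bin(get_hex_const(2, 3, 16))
--     '0b1000110001100011'
--     >>> bin(get_hex_const(1, 4, 16))
--     '0b1000010000100001'
--     """
--     hex_num, bit_idx = 0, 0
--     while bit_idx < num_bits:
--         for _ in range(successive_digits):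
--             hex_num += 2**bit_idx
--             bit_idx += 1
--             if bit_idx >= num_bits:
--                 break
--         bit_idx += spacing
--     return hex_num
-- ===== SOURCE B (Python) =====
-- def __get_hex_const__(successive_digits: int, spacing: int,
--                       num_bits: int = 32) -> int:
--     """Bit-parting constant: one closed-form block (1 << width) - 1 per period,
--     placed at strides of successive_digits + spacing."""
--     if successive_digits <= 0 or num_bits <= 0:
--         return 0
--     period = successive_digits + spacing
--     res = 0
--     for start in range(0, num_bits, period):
--         width = min(successive_digits, num_bits - start)
--         res += ((1 << width) - 1) << start
--     return res
-- ===== Notes on version B (the rewrite author's own statement) =====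
-- stated objective: faster
-- what changed: Replaces A's per-bit nested loop with a mutable bit cursor by one pass over period strides that adds each block in closed form ((1 << width) - 1) << start, doing one big-int addition per period instead of one per bit.
import Mathlib
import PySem

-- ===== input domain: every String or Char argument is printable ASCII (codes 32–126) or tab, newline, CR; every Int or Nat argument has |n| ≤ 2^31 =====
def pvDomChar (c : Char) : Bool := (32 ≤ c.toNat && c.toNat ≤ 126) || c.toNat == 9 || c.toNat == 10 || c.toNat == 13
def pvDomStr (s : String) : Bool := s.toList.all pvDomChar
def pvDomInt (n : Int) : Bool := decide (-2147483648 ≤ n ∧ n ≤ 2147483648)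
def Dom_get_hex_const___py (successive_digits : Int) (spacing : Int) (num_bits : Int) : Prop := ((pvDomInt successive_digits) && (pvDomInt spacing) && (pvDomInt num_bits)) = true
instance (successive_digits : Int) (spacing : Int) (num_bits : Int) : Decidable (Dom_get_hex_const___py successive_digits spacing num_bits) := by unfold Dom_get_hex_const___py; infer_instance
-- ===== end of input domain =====

-- B replaces A's nested per-bit block-filling loop (mutable bit cursor with a mid-loop break)
-- by one pass over period strides that adds each block in closed form ((1 << width) - 1) << start.


-- ===== PORT A =====
-- inner 'for _ in range(successive_digits)' with its mid-loop break;
-- '2**bit_idx' is ported as '2 ^ bit_idx.toNat', exact since bit_idx ≥ 0 on every input Pre_ admits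
def pvInnerA (num_bits : Int) : Nat → Int → Int → Int × Int
  | 0, hex_num, bit_idx => (hex_num, bit_idx)
  | Nat.succ k, hex_num, bit_idx =>
      let hex' := hex_num + 2 ^ bit_idx.toNat
      let idx' := bit_idx + 1
      if num_bits ≤ idx' then (hex', idx')
      else pvInnerA num_bits k hex' idx'

-- outer 'while bit_idx < num_bits' loop; fuel num_bits.toNat + 1 suffices on Pre_,
-- where bit_idx strictly increases each iteration (a guard making the loop total, not an algorithm change)
def pvOuterA (successive_digits spacing num_bits : Int) : Nat → Int → Int → Int
  | 0, hex_num, _ => hex_num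
  | Nat.succ f, hex_num, bit_idx =>
      if bit_idx < num_bits then
        let p := pvInnerA num_bits successive_digits.toNat hex_num bit_idx
        pvOuterA successive_digits spacing num_bits f p.1 (p.2 + spacing)
      else hex_num

def get_hex_const___py (successive_digits : Int) (spacing : Int) (num_bits : Int) : Int :=
  pvOuterA successive_digits spacing num_bits (num_bits.toNat + 1) 0 0

-- ===== PORT B =====
-- 'for start in range(0, num_bits, period): res += ((1 << width) - 1) << start';
-- shifts are ported as '2 ^ ·.toNat', exact since width ≥ 1 and start ≥ 0 on every iteration reached
def get_hex_const___py_alt (successive_digits : Int) (spacing : Int) (num_bits : Int) : Int :=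
  if successive_digits ≤ 0 ∨ num_bits ≤ 0 then 0
  else
    let period := successive_digits + spacing
    (PySem.List.pyRange 0 num_bits period).foldl
      (fun res start =>
        res + ((2 : Int) ^ (min successive_digits (num_bits - start)).toNat - 1) * 2 ^ start.toNat) 0

-- ===== PRECONDITION & SPEC =====
-- Pre_ excludes exactly the inputs on which A never returns: with num_bits > 0, a negative spacing
-- (the break resets the cursor below num_bits forever) or a nonpositive successive_digits with
-- nonpositive spacing (the cursor never advances); on every input A returns on, Pre_ holds.
def Pre_get_hex_const___py (successive_digits : Int) (spacing : Int) (num_bits : Int) : Prop :=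
  num_bits ≤ 0 ∨ (0 < successive_digits ∧ 0 ≤ spacing) ∨ (successive_digits ≤ 0 ∧ 0 < spacing)
instance (successive_digits : Int) (spacing : Int) (num_bits : Int) : Decidable (Pre_get_hex_const___py successive_digits spacing num_bits) := by unfold Pre_get_hex_const___py; infer_instance

def pvWitness_get_hex_const___py : Int × Int × Int := (2, 3, 16)

def Spec_get_hex_const___py (successive_digits : Int) (spacing : Int) (num_bits : Int) (out : Int) : Prop := out = get_hex_const___py_alt successive_digits spacing num_bits
instance (successive_digits : Int) (spacing : Int) (num_bits : Int) (out : Int) : Decidable (Spec_get_hex_const___py successive_digits spacing num_bits out) := by unfold Spec_get_hex_const___py; infer_instance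

-- ===== CLAIM (what is proved, stated in full; the proofs are below) =====
def Claim_equal_get_hex_const___py : Prop := ∀ (successive_digits : Int) (spacing : Int) (num_bits : Int), Dom_get_hex_const___py successive_digits spacing num_bits → Pre_get_hex_const___py successive_digits spacing num_bits → Spec_get_hex_const___py successive_digits spacing num_bits (get_hex_const___py successive_digits spacing num_bits)

-- ===== LEMMAS AND PROOFS =====

-- sum of 2^j over a contiguous block of positions (what A's inner loop adds)
def pvGeo : Int → Nat → Int
  | _, 0 => 0
  | lo, Nat.succ n => (2 : Int) ^ lo.toNat + pvGeo (lo + 1) n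

lemma pvGeo_closed : ∀ (n : Nat) (lo : Int), 0 ≤ lo → pvGeo lo n = ((2 : Int) ^ n - 1) * 2 ^ lo.toNat := by
  intro n
  induction n with
  | zero => intro lo _; simp [pvGeo]
  | succ n ih =>
      intro lo h0
      rw [pvGeo, ih (lo + 1) (by omega), show (lo + 1).toNat = lo.toNat + 1 by omega,
          pow_succ 2 n, pow_succ 2 lo.toNat]
      ring

lemma pvRange_pos_nil (a b s : Int) (hs : 0 < s) (h : b ≤ a) :
    PySem.List.pyRange a b s = [] := by
  rw [PySem.List.pyRange_of_pos a b hs, if_neg (by omega)]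
  simp

lemma pvRange_pos_cons (a b s : Int) (hs : 0 < s) (hab : a < b) :
    PySem.List.pyRange a b s = a :: PySem.List.pyRange (a + s) b s := by
  rw [PySem.List.pyRange_of_pos a b hs, PySem.List.pyRange_of_pos (a + s) b hs, if_pos hab]
  have hx : 0 ≤ b - a - 1 := by omega
  have h2 : (b - a + s - 1) / s = (b - a - 1) / s + 1 := by
    rw [show b - a + s - 1 = (b - a - 1) + 1 * s by ring,
        Int.add_mul_ediv_right _ _ (by omega : s ≠ 0)]
  have hnn : 0 ≤ (b - a - 1) / s := Int.ediv_nonneg hx (by omega)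
  have key : ((b - a + s - 1) / s).toNat
      = (if a + s < b then ((b - (a + s) + s - 1) / s).toNat else 0) + 1 := by
    by_cases hc : a + s < b
    · rw [if_pos hc, show b - (a + s) + s - 1 = b - a - 1 by ring]
      omega
    · rw [if_neg hc]
      have hz : (b - a - 1) / s = 0 := Int.ediv_eq_zero_of_lt hx (by omega)
      omega
  rw [key, List.range_succ_eq_map]
  simp only [List.map_cons, List.map_map, Nat.cast_zero, mul_zero, add_zero]
  refine congrArg (List.cons a) ?_
  apply List.map_congr_left
  intro k _
  simp only [Function.comp_apply]
  push_cast
  ring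

-- A's inner loop adds min(k, num_bits - bit_idx) consecutive powers of two
lemma pvInnerA_eq (nb : Int) :
    ∀ (k : Nat) (hex idx : Int), idx < nb →
      pvInnerA nb k hex idx =
        (hex + pvGeo idx (min k (nb - idx).toNat), idx + min k (nb - idx).toNat) := by
  intro k
  induction k with
  | zero => intro hex idx h; simp [pvInnerA, pvGeo]
  | succ k ih =>
      intro hex idx h
      show (if nb ≤ idx + 1 then (hex + 2 ^ idx.toNat, idx + 1)
            else pvInnerA nb k (hex + 2 ^ idx.toNat) (idx + 1)) = _
      by_cases hb : nb ≤ idx + 1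
      · have hm : min (k + 1) (nb - idx).toNat = 1 := by omega
        rw [if_pos hb, hm]
        simp [pvGeo]
      · rw [if_neg hb, ih (hex + 2 ^ idx.toNat) (idx + 1) (by omega)]
        have hm : min (k + 1) (nb - idx).toNat = min k (nb - (idx + 1)).toNat + 1 := by omega
        rw [hm]
        refine Prod.ext ?_ ?_
        · show hex + 2 ^ idx.toNat + pvGeo (idx + 1) (min k (nb - (idx + 1)).toNat)
            = hex + pvGeo idx (min k (nb - (idx + 1)).toNat + 1)
          simp only [pvGeo]
          ring
        · show idx + 1 + (↑(min k (nb - (idx + 1)).toNat) : Int) = idx + ↑(min k (nb - (idx + 1)).toNat + 1)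
          push_cast; ring

-- when successive_digits ≤ 0 the inner loop is empty and the cursor just spins past num_bits
lemma pvOuterA_spin (sd sp nb : Int) (hsd : sd ≤ 0) (hsp : 0 < sp) :
    ∀ (f : Nat) (hex idx : Int), (nb - idx).toNat < f →
      pvOuterA sd sp nb f hex idx = hex := by
  intro f
  induction f with
  | zero => intro hex idx h; omega
  | succ f ih =>
      intro hex idx h
      show (if idx < nb then pvOuterA sd sp nb f (pvInnerA nb sd.toNat hex idx).1 ((pvInnerA nb sd.toNat hex idx).2 + sp) else hex) = hex
      by_cases hb : idx < nb
      · have he : sd.toNat = 0 := by omega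
        rw [if_pos hb, he]
        show pvOuterA sd sp nb f hex (idx + sp) = hex
        exact ih hex (idx + sp) (by omega)
      · rw [if_neg hb]

lemma pvOuterA_done (sd sp nb : Int) (f : Nat) (hf : 1 ≤ f) (hex idx : Int) (h : nb ≤ idx) :
    pvOuterA sd sp nb f hex idx = hex := by
  cases f with
  | zero => omega
  | succ f =>
      show (if idx < nb then _ else hex) = hex
      rw [if_neg (by omega)]

-- main invariant: each outer iteration of A contributes exactly one closed-form block of B
lemma pvOuterA_blocks (sd sp nb : Int) (hsd : 0 < sd) (hsp : 0 ≤ sp) :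
    ∀ (f : Nat) (hex idx : Int), 0 ≤ idx → (nb - idx).toNat < f →
      pvOuterA sd sp nb f hex idx
        = hex + ((PySem.List.pyRange idx nb (sd + sp)).map
            (fun start => ((2 : Int) ^ (min sd (nb - start)).toNat - 1) * 2 ^ start.toNat)).sum := by
  intro f
  induction f with
  | zero => intro hex idx _ h; omega
  | succ f ih =>
      intro hex idx h0 hf
      by_cases hb : idx < nb
      case neg =>
        rw [pvOuterA_done sd sp nb (f + 1) (by omega) hex idx (by omega),
            pvRange_pos_nil idx nb (sd + sp) (by omega) (by omega)]
        simp
      case pos =>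
        have hf1 : 1 ≤ f := by omega
        show (if idx < nb then pvOuterA sd sp nb f (pvInnerA nb sd.toNat hex idx).1 ((pvInnerA nb sd.toNat hex idx).2 + sp) else hex) = _
        rw [if_pos hb, pvInnerA_eq nb sd.toNat hex idx hb,
            pvRange_pos_cons idx nb (sd + sp) (by omega) hb]
        simp only [List.map_cons, List.sum_cons]
        have hmin : (min sd (nb - idx)).toNat = min sd.toNat (nb - idx).toNat := by omega
        by_cases hc : (nb - idx).toNat ≤ sd.toNat
        · -- the break truncates the final block and the loop is about to end
          have hm : min sd.toNat (nb - idx).toNat = (nb - idx).toNat := by omega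
          rw [hm, pvOuterA_done sd sp nb f hf1 _ _ (by omega),
              pvRange_pos_nil (idx + (sd + sp)) nb (sd + sp) (by omega) (by omega),
              pvGeo_closed (nb - idx).toNat idx h0, hmin, hm]
          simp
        · -- a full block was written; the cursor advances by exactly one period
          have hm : min sd.toNat (nb - idx).toNat = sd.toNat := by omega
          rw [hm, show idx + (sd.toNat : Int) + sp = idx + (sd + sp) by omega,
              ih (hex + pvGeo idx sd.toNat) (idx + (sd + sp)) (by omega) (by omega),
              pvGeo_closed sd.toNat idx h0, hmin, hm]
          ring

-- ===== VERDICT (by name: the statement is the Claim_ definition above) =====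
theorem get_hex_const___py_spec : Claim_equal_get_hex_const___py := by
  intro sd sp nb _ hpre
  show get_hex_const___py sd sp nb = get_hex_const___py_alt sd sp nb
  unfold get_hex_const___py get_hex_const___py_alt
  by_cases h0 : sd ≤ 0 ∨ nb ≤ 0
  · -- B returns 0 outright; A's loop body never fires (empty inner loop or loop never entered)
    rw [if_pos h0]
    by_cases h1 : nb ≤ 0
    · have hz : nb.toNat = 0 := by omega
      rw [hz]
      show (if (0 : Int) < nb then _ else (0 : Int)) = 0
      rw [if_neg (by omega)]
    · have hsd : sd ≤ 0 := by omega
      have hsp : 0 < sp := by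
        rcases hpre with h | ⟨h, _⟩ | ⟨_, h⟩ <;> omega
      exact pvOuterA_spin sd sp nb hsd hsp (nb.toNat + 1) 0 0 (by omega)
  · -- the main case: positive block length, nonnegative spacing, positive num_bits
    push_neg at h0
    have hsd : 0 < sd := h0.1
    have hsp : 0 ≤ sp := by rcases hpre with h | ⟨_, h⟩ | ⟨h, _⟩ <;> omega
    rw [if_neg (by omega)]
    show pvOuterA sd sp nb (nb.toNat + 1) 0 0
      = (PySem.List.pyRange 0 nb (sd + sp)).foldl
          (fun res start => res + ((2 : Int) ^ (min sd (nb - start)).toNat - 1) * 2 ^ start.toNat) 0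
    rw [PySem.List.foldl_add,
        pvOuterA_blocks sd sp nb hsd hsp (nb.toNat + 1) 0 0 le_rfl (by omega)]
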